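-- pv_equiv track=rewrite | github.com/RoryBarnes/vaibify | vaibify/gui/fileStatusManager.py | _fbAnyDataFileChanged
-- ===== SOURCE A (Python) =====
-- import posixpath
--
-- def _fbAnyDataFileChanged(listChangedPaths, listDataFiles):
--     """Return True if any changed path matches a data file."""
--     setDataBasenames = {
--         posixpath.basename(sFile) for sFile in listDataFiles
--     }
--     for sChangedPath in listChangedPaths:
--         if posixpath.basename(sChangedPath) in setDataBasenames:
--             return True
--     return False
-- ===== SOURCE B (Python) =====
-- def _fbAnyDataFileChanged(listChangedPaths, listDataFiles):
--     """Return True if any changed path matches a data file."""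
--     listChanged = sorted(sPath.rpartition('/')[2] for sPath in listChangedPaths)
--     listData = sorted(sFile.rpartition('/')[2] for sFile in listDataFiles)
--     i = 0
--     j = 0
--     while i < len(listChanged) and j < len(listData):
--         if listChanged[i] == listData[j]:
--             return True
--         elif listChanged[i] < listData[j]:
--             i += 1
--         else:
--             j += 1
--     return False
-- ===== Notes on version B (the rewrite author's own statement) =====
-- stated objective: alternative
-- what changed: B sorts both basename lists and runs a two-pointer merge scan for a common element, replacing A's hash-set build plus per-path membership loop with a sort-then-scan intersection test.
import Mathlib
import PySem

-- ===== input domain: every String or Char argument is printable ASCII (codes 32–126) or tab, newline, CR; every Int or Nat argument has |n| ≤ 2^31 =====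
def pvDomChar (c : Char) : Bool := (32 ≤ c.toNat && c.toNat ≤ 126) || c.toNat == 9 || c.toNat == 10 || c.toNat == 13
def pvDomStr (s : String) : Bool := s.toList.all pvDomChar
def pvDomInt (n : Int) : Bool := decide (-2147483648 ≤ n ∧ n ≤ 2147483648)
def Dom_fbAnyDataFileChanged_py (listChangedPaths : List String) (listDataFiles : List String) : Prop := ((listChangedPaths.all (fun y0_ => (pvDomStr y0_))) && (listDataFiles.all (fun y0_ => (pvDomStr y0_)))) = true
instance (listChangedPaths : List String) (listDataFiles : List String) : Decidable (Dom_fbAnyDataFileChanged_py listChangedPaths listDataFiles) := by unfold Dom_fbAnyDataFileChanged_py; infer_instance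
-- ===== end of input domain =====

-- B sorts both basename lists and detects a shared element by a two-pointer merge scan,
-- a different (sort-then-scan) algorithm from A's hash-set-plus-membership-loop; same result.

-- posixpath.basename(s): the suffix of s after the last '/' (exact for posixpath:
-- basename(s) = s[s.rfind('/')+1:]).
def pvBasename (s : String) : String :=
  String.ofList ((s.toList.reverse.takeWhile (fun c => c ≠ '/')).reverse)

-- ===== PORT A =====
-- the 'for sChangedPath in listChangedPaths: … return True' loop with early return
def fbALoop (setDataBasenames : PySem.Set String) : List String → Bool
  | [] => false
  | sChangedPath :: rest =>
      if PySem.Set.contains setDataBasenames (pvBasename sChangedPath) then true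
      else fbALoop setDataBasenames rest

def fbAnyDataFileChanged_py (listChangedPaths : List String) (listDataFiles : List String) : Bool :=
  let setDataBasenames : PySem.Set String := PySem.Set.ofList (listDataFiles.map pvBasename)
  fbALoop setDataBasenames listChangedPaths

-- ===== PORT B =====
-- B's while-loop over the two sorted lists with indices i, j: advancing an index is
-- structural recursion on the corresponding list.
def fbMergeScan : List String → List String → Bool
  | [], _ => false
  | _ :: _, [] => false
  | x :: xs, y :: ys =>
      if x = y then true
      else if x < y then fbMergeScan xs (y :: ys)
      else fbMergeScan (x :: xs) ys

def fbAnyDataFileChanged_py_alt (listChangedPaths : List String) (listDataFiles : List String) : Bool :=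
  let listChanged := PySem.List.sorted (listChangedPaths.map pvBasename) (fun x => x) false
  let listData := PySem.List.sorted (listDataFiles.map pvBasename) (fun x => x) false
  fbMergeScan listChanged listData

-- ===== PRECONDITION & SPEC =====
def Spec_fbAnyDataFileChanged_py (listChangedPaths : List String) (listDataFiles : List String) (out : Bool) : Prop := out = fbAnyDataFileChanged_py_alt listChangedPaths listDataFiles
instance (listChangedPaths : List String) (listDataFiles : List String) (out : Bool) : Decidable (Spec_fbAnyDataFileChanged_py listChangedPaths listDataFiles out) := by unfold Spec_fbAnyDataFileChanged_py; infer_instance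

-- ===== CLAIM =====
def Claim_equal_fbAnyDataFileChanged_py : Prop := ∀ (listChangedPaths : List String) (listDataFiles : List String), Dom_fbAnyDataFileChanged_py listChangedPaths listDataFiles → Spec_fbAnyDataFileChanged_py listChangedPaths listDataFiles (fbAnyDataFileChanged_py listChangedPaths listDataFiles)

-- ===== LEMMAS AND PROOFS =====
theorem fbALoop_eq_true_iff (s : PySem.Set String) (l : List String) :
    fbALoop s l = true ↔ ∃ p ∈ l, pvBasename p ∈ s := by
  induction l with
  | nil => simp [fbALoop]
  | cons p rest ih =>
      simp only [fbALoop]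
      split_ifs with h
      · exact iff_of_true rfl ⟨p, List.mem_cons_self .., (PySem.Set.contains_iff _ _).mp h⟩
      · rw [ih]
        constructor
        · rintro ⟨q, hq, hm⟩; exact ⟨q, List.mem_cons_of_mem _ hq, hm⟩
        · rintro ⟨q, hq, hm⟩
          rcases List.mem_cons.mp hq with rfl | hq'
          · exact absurd ((PySem.Set.contains_iff _ _).mpr hm) h
          · exact ⟨q, hq', hm⟩

-- On lists sorted in nondecreasing order, the merge scan finds exactly a common element.
theorem fbMergeScan_eq_true_iff (xs ys : List String)
    (hx : xs.Pairwise (· ≤ ·)) (hy : ys.Pairwise (· ≤ ·)) :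
    fbMergeScan xs ys = true ↔ ∃ z, z ∈ xs ∧ z ∈ ys := by
  induction xs generalizing ys with
  | nil => simp [fbMergeScan]
  | cons x xs ihx =>
      induction ys with
      | nil => simp [fbMergeScan]
      | cons y ys ihy =>
          rcases List.pairwise_cons.mp hx with ⟨hxall, hx'⟩
          rcases List.pairwise_cons.mp hy with ⟨hyall, hy'⟩
          simp only [fbMergeScan]
          split_ifs with heq hlt
          · subst heq
            exact iff_of_true rfl ⟨x, List.mem_cons_self .., List.mem_cons_self ..⟩
          · -- x < y: x cannot occur in y :: ys
            rw [ihx (y :: ys) hx' hy]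
            constructor
            · rintro ⟨z, hz1, hz2⟩; exact ⟨z, List.mem_cons_of_mem _ hz1, hz2⟩
            · rintro ⟨z, hz1, hz2⟩
              rcases List.mem_cons.mp hz1 with rfl | hz1'
              · rcases List.mem_cons.mp hz2 with rfl | hz2'
                · exact absurd rfl heq
                · exact absurd (lt_of_lt_of_le hlt (hyall _ hz2')) (lt_irrefl _)
              · exact ⟨z, hz1', hz2⟩
          · -- y < x: y cannot occur in x :: xs
            have hyx : y < x := lt_of_le_of_ne (not_lt.mp hlt) (fun h => heq h.symm)
            rw [ihy hy']
            constructor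
            · rintro ⟨z, hz1, hz2⟩; exact ⟨z, hz1, List.mem_cons_of_mem _ hz2⟩
            · rintro ⟨z, hz1, hz2⟩
              rcases List.mem_cons.mp hz2 with rfl | hz2'
              · rcases List.mem_cons.mp hz1 with rfl | hz1'
                · exact absurd rfl heq
                · exact absurd (lt_of_lt_of_le hyx (hxall _ hz1')) (lt_irrefl _)
              · exact ⟨z, hz1, hz2'⟩

-- ===== VERDICT =====
theorem fbAnyDataFileChanged_py_spec : Claim_equal_fbAnyDataFileChanged_py := by
  intro l d _
  unfold Spec_fbAnyDataFileChanged_py fbAnyDataFileChanged_py fbAnyDataFileChanged_py_alt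
  simp only
  rw [Bool.eq_iff_iff, fbALoop_eq_true_iff,
    fbMergeScan_eq_true_iff _ _ (PySem.List.sorted_pairwise ..) (PySem.List.sorted_pairwise ..)]
  simp only [PySem.Set.mem_ofList, PySem.List.mem_sorted, List.mem_map]
  constructor
  · rintro ⟨p, hp, hm⟩
    exact ⟨pvBasename p, ⟨p, hp, rfl⟩, hm⟩
  · rintro ⟨z, ⟨p, hp, rfl⟩, hm⟩
    exact ⟨p, hp, hm⟩
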